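-- pv_equiv track=rewrite | github.com/nomindnick/TrailerBillAnalyzerV2 | src/services/report_generator.py | _process_subheadings_and_bullets_html
-- ===== SOURCE A (Python) =====
-- from typing import Dict, Any, List, Union
--
-- def _process_subheadings_and_bullets_html(lines: List[str]) -> str:
--     """
--     Convert lines into subheadings (h4) when a line ends with ':'
--     and bullet points (<ul><li>) otherwise.
--     """
--     html_chunks = []
--     in_list = False
--
--     for line in lines:
--         if line.endswith(':'):
--             if in_list:
--                 html_chunks.append("</ul>")
--                 in_list = False
--             subheading = line[:-1]  # remove trailing colon
--             html_chunks.append(f"<h4>{subheading}</h4>")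
--         else:
--             if not in_list:
--                 html_chunks.append("<ul>")
--                 in_list = True
--             html_chunks.append(f"<li>{line}</li>")
--
--     if in_list:
--         html_chunks.append("</ul>")
--
--     return "\n".join(html_chunks)
-- ===== SOURCE B (Python) =====
-- from typing import List
--
-- def _process_subheadings_and_bullets_html(lines: List[str]) -> str:
--     """Group lines into maximal runs by 'ends with colon', then render each run."""
--     groups = []  # list of (is_heading, [lines of the run in order])
--     for line in lines:
--         k = line.endswith(':')
--         if groups and groups[-1][0] == k:
--             groups[-1][1].append(line)
--         else:
--             groups.append((k, [line]))
--     chunks = []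
--     for k, g in groups:
--         if k:
--             chunks.extend(f"<h4>{l[:-1]}</h4>" for l in g)
--         else:
--             chunks.append("<ul>")
--             chunks.extend(f"<li>{l}</li>" for l in g)
--             chunks.append("</ul>")
--     return "\n".join(chunks)
-- ===== Notes on version B (the rewrite author's own statement) =====
-- stated objective: alternative
-- what changed: Replaces A's stateful in_list flag machine with a group-then-render decomposition: lines are first split into maximal runs by 'ends with colon' (built by a right fold), then each run is rendered as a block of <h4> headings or a single <ul> list.
import Mathlib
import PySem

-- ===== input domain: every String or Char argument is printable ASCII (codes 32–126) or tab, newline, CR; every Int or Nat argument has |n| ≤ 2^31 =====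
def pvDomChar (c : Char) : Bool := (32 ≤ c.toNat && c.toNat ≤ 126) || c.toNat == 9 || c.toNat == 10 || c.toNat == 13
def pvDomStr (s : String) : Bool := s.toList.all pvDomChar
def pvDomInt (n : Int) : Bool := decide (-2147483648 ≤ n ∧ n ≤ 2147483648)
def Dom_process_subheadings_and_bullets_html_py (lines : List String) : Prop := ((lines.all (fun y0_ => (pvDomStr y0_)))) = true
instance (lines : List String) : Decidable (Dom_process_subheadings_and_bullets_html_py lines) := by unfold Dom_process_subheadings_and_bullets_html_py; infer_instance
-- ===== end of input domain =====

-- B replaces A's in_list flag machine by a group-then-render decomposition: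
-- lines are first split into maximal runs of 'ends with colon', then each run
-- is rendered as a block of <h4>s or one <ul>. Objective: alternative, same cost.

-- ===== PORT A =====
-- A's for loop over `lines` with the `in_list` flag; each iteration appends the
-- same chunks in the same order (emitted forward by structural recursion).
def pvGoA (ls : List String) (inl : Bool) : List String :=
  match ls with
  | [] => if inl then ["</ul>"] else []
  | l :: rest =>
    if PySem.Str.endswith l ":" then
      (if inl then ["</ul>"] else []) ++
        ("<h4>" ++ PySem.Str.slice l none (some (-1)) ++ "</h4>") :: pvGoA rest false
    else
      (if inl then [] else ["<ul>"]) ++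
        ("<li>" ++ l ++ "</li>") :: pvGoA rest true

def process_subheadings_and_bullets_html_py (lines : List String) : String :=
  PySem.Str.join "\n" (pvGoA lines false)

-- ===== PORT B =====
def pvKey (l : String) : Bool := PySem.Str.endswith l ":"

-- Source B's first loop: extend the last group when the key matches, else open a new one
def pvStep (gs : List (Bool × List String)) (l : String) : List (Bool × List String) :=
  match gs.getLast? with
  | none => [(pvKey l, [l])]
  | some (k, g) =>
    if pvKey l = k then gs.dropLast ++ [(k, g ++ [l])] else gs ++ [(pvKey l, [l])]

def pvGroups (lines : List String) : List (Bool × List String) :=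
  lines.foldl pvStep []

-- Source B's second loop: render one run
def pvRender (p : Bool × List String) : List String :=
  if p.1 then p.2.map (fun l => "<h4>" ++ PySem.Str.slice l none (some (-1)) ++ "</h4>")
  else "<ul>" :: (p.2.map (fun l => "<li>" ++ l ++ "</li>") ++ ["</ul>"])

def process_subheadings_and_bullets_html_py_alt (lines : List String) : String :=
  PySem.Str.join "\n" ((pvGroups lines).flatMap pvRender)

-- ===== PRECONDITION & SPEC =====
def Spec_process_subheadings_and_bullets_html_py (lines : List String) (out : String) : Prop := out = process_subheadings_and_bullets_html_py_alt lines
instance (lines : List String) (out : String) : Decidable (Spec_process_subheadings_and_bullets_html_py lines out) := by unfold Spec_process_subheadings_and_bullets_html_py; infer_instance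

-- ===== CLAIM (what is proved, stated in full; the proofs are below) =====
def Claim_equal_process_subheadings_and_bullets_html_py : Prop := ∀ (lines : List String), Dom_process_subheadings_and_bullets_html_py lines → Spec_process_subheadings_and_bullets_html_py lines (process_subheadings_and_bullets_html_py lines)

-- ===== LEMMAS AND PROOFS =====

-- Proof-side view of the grouping: merge one run fragment into a run list …
def pvMerge (p : Bool × List String) (gs : List (Bool × List String)) : List (Bool × List String) :=
  match gs with
  | [] => [p]
  | (k, g) :: rest => if p.1 = k then (k, p.2 ++ g) :: rest else p :: (k, g) :: rest

-- … giving the same maximal runs as a right fold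
def pvRuns : List String → List (Bool × List String)
  | [] => []
  | l :: ls => pvMerge (pvKey l, [l]) (pvRuns ls)

theorem pvMerge_merge (k : Bool) (g h : List String) (gs : List (Bool × List String)) :
    pvMerge (k, g) (pvMerge (k, h) gs) = pvMerge (k, g ++ h) gs := by
  cases gs with
  | nil => simp [pvMerge]
  | cons p rest =>
    obtain ⟨k', g'⟩ := p
    by_cases hk : k = k' <;> simp [pvMerge, hk]

theorem pvMerge_ne (k : Bool) (g : List String) (p : Bool × List String)
    (gs : List (Bool × List String)) (h : k ≠ p.1) :
    pvMerge (k, g) (pvMerge p gs) = (k, g) :: pvMerge p gs := by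
  cases gs with
  | nil => simp [pvMerge, h]
  | cons q rest =>
    obtain ⟨k', g'⟩ := q
    by_cases hk : p.1 = k'
    · subst hk; simp [pvMerge, h]
    · simp [pvMerge, hk, h]

-- the forward foldl of Source B computes the right-fold runs
theorem pvFoldl_step (ls : List String) : ∀ (gs : List (Bool × List String)) (k : Bool) (g : List String),
    List.foldl pvStep (gs ++ [(k, g)]) ls = gs ++ pvMerge (k, g) (pvRuns ls) := by
  induction ls with
  | nil => intro gs k g; simp [pvRuns, pvMerge]
  | cons l rest ih =>
    intro gs k g
    by_cases hk : pvKey l = k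
    · have h1 : pvStep (gs ++ [(k, g)]) l = gs ++ [(k, g ++ [l])] := by
        simp [pvStep, hk]
      rw [List.foldl_cons, h1, ih, pvRuns, hk, pvMerge_merge]
    · have h1 : pvStep (gs ++ [(k, g)]) l = (gs ++ [(k, g)]) ++ [(pvKey l, [l])] := by
        simp [pvStep, hk]
      rw [List.foldl_cons, h1, ih, pvRuns, pvMerge_ne k g (pvKey l, [l]) (pvRuns rest) (Ne.symm hk)]
      simp

theorem pvGroups_eq_runs (ls : List String) : pvGroups ls = pvRuns ls := by
  cases ls with
  | nil => rfl
  | cons l rest =>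
    have h0 : pvStep [] l = [] ++ [(pvKey l, [l])] := by simp [pvStep]
    unfold pvGroups
    rw [List.foldl_cons, h0, pvFoldl_step, pvRuns]
    simp

-- What A's loop emits from state `inl`, in terms of the runs: from `false` it
-- is exactly the rendered runs; from `true` it first finishes the open <ul>.
theorem pvGoA_eq (ls : List String) :
    pvGoA ls false = (pvRuns ls).flatMap pvRender ∧
    pvGoA ls true =
      (match pvRuns ls with
       | (false, g) :: rest =>
           g.map (fun l => "<li>" ++ l ++ "</li>") ++ "</ul>" :: rest.flatMap pvRender
       | gs => "</ul>" :: gs.flatMap pvRender) := by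
  induction ls with
  | nil => constructor <;> rfl
  | cons l rest ih =>
    obtain ⟨ihf, iht⟩ := ih
    refine ⟨?_, ?_⟩ <;>
    · by_cases h : PySem.Chars.endswith l.toList [':'] = true <;>
      · cases hg : pvRuns rest with
        | nil => simp_all [pvGoA, pvRuns, pvMerge, pvKey, pvRender]
        | cons p tl =>
          obtain ⟨k, g⟩ := p
          cases k <;> simp_all [pvGoA, pvRuns, pvMerge, pvKey, pvRender]

-- ===== VERDICT (by name: the statement is the Claim_ definition above) =====
theorem process_subheadings_and_bullets_html_py_spec : Claim_equal_process_subheadings_and_bullets_html_py := by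
  intro lines _
  unfold Spec_process_subheadings_and_bullets_html_py
  unfold process_subheadings_and_bullets_html_py process_subheadings_and_bullets_html_py_alt
  rw [(pvGoA_eq lines).1, pvGroups_eq_runs]
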